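-- pv_equiv track=rewrite | github.com/pypi-data/pypi-mirror-401 | packages/takopi-ralph/takopi_ralph-0.2.0-py3-none-any.whl/takopi_ralph/command/backend.py | _parse_project_branch
-- ===== SOURCE A (Python) =====
-- RALPH_COMMANDS = frozenset({"init", "prd", "start", "status", "stop", "reset", "help"})
--
-- def _parse_project_branch(
--     args: tuple[str, ...],
--     project_aliases: set[str],
-- ) -> tuple[str | None, str | None, tuple[str, ...]]:
--     """Parse project and @branch from command args.
--
--     Args:
--         args: Full command args including 'ralph'
--         project_aliases: Known project names from takopi config
--
--     Returns:
--         (project, branch, remaining_args)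
--
--     Examples:
--         ('ralph', 'start') -> (None, None, ('start',))
--         ('ralph', 'myproj', 'start') -> ('myproj', None, ('start',))
--         ('ralph', '@feat', 'start') -> (None, 'feat', ('start',))
--         ('ralph', 'myproj', '@feat', 'start') -> ('myproj', 'feat', ('start',))
--     """
--     project: str | None = None
--     branch: str | None = None
--     remaining = list(args[1:])  # Skip 'ralph'
--
--     consumed = 0
--     for token in remaining:
--         # @branch token
--         if token.startswith("@") and len(token) > 1:
--             branch = token[1:]
--             consumed += 1
--             continue
--
--         # Check if it's a known project (not a command)
--         lower = token.lower()
--         if lower in project_aliases and lower not in RALPH_COMMANDS: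
--             project = lower
--             consumed += 1
--             continue
--
--         # Hit a command or unknown token - stop parsing context
--         break
--
--     return project, branch, tuple(remaining[consumed:])
-- ===== SOURCE B (Python) =====
-- from itertools import takewhile
--
-- RALPH_COMMANDS = frozenset({"init", "prd", "start", "status", "stop", "reset", "help"})
--
--
-- def _is_context_token(token, project_aliases):
--     if token.startswith("@") and len(token) > 1:
--         return True
--     lower = token.lower()
--     return lower in project_aliases and lower not in RALPH_COMMANDS
--
--
-- def _parse_project_branch(args, project_aliases):
--     rest = list(args[1:])
--     prefix = list(takewhile(lambda t: _is_context_token(t, project_aliases), rest))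
--     project = None
--     branch = None
--     for token in prefix:
--         if token.startswith("@") and len(token) > 1:
--             branch = token[1:]
--         else:
--             project = token.lower()
--     return project, branch, tuple(rest[len(prefix):])
-- ===== Notes on version B (the rewrite author's own statement) =====
-- stated objective: simpler
-- what changed: Splits A's single interleaved loop with a consumed-counter and break into two passes: takewhile finds the context prefix, then a plain loop assigns project/branch over just that prefix; remaining is computed from the prefix length.
import Mathlib
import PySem

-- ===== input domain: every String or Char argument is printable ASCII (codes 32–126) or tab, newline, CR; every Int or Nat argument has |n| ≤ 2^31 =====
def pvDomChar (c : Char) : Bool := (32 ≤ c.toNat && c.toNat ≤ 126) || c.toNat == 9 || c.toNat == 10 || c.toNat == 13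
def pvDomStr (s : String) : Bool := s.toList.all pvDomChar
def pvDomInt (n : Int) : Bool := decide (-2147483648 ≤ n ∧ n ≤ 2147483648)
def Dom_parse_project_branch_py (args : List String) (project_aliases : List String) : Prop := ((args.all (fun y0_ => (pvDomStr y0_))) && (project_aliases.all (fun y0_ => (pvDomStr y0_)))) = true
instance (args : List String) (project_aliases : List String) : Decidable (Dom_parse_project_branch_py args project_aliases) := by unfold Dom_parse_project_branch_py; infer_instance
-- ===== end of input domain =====

-- B separates A's single interleaved consume-and-break loop into two passes (takewhile to find
-- the context prefix, then a plain assignment loop over that prefix); objective: simpler.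

-- ===== PORT A =====
def pvRalphCommands : List String := ["init", "prd", "start", "status", "stop", "reset", "help"]

-- A's loop: state (project, branch, consumed); break = return the state.
def pvAloop (aliases : List String) : List String → Option String × Option String × Nat → Option String × Option String × Nat
  | [], st => st
  | t :: rest, (p, b, c) =>
    if PySem.Str.startswith t "@" && decide (1 < PySem.Str.len t) then
      pvAloop aliases rest (p, some (PySem.Str.slice t (some 1) none), c + 1)
    else
      let lower := PySem.Str.lower t
      if aliases.contains lower && !(pvRalphCommands.contains lower) then
        pvAloop aliases rest (some lower, b, c + 1)
      else
        (p, b, c)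

def parse_project_branch_py (args : List String) (project_aliases : List String) : Option String × Option String × List String :=
  let remaining := PySem.List.slice args (some 1) none
  let st := pvAloop project_aliases remaining (none, none, 0)
  (st.1, st.2.1, PySem.List.slice remaining (some (st.2.2 : Int)) none)

-- ===== PORT B =====
def pvIsContext (aliases : List String) (t : String) : Bool :=
  (PySem.Str.startswith t "@" && decide (1 < PySem.Str.len t)) ||
  (aliases.contains (PySem.Str.lower t) && !(pvRalphCommands.contains (PySem.Str.lower t)))

def pvBStep (pb : Option String × Option String) (t : String) : Option String × Option String :=
  if PySem.Str.startswith t "@" && decide (1 < PySem.Str.len t) then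
    (pb.1, some (PySem.Str.slice t (some 1) none))
  else
    (some (PySem.Str.lower t), pb.2)

def parse_project_branch_py_alt (args : List String) (project_aliases : List String) : Option String × Option String × List String :=
  let rest := PySem.List.slice args (some 1) none
  let pre := rest.takeWhile (pvIsContext project_aliases)
  let pb := pre.foldl pvBStep (none, none)
  (pb.1, pb.2, rest.drop pre.length)

-- ===== PRECONDITION & SPEC =====
def Spec_parse_project_branch_py (args : List String) (project_aliases : List String) (out : Option String × Option String × List String) : Prop := out = parse_project_branch_py_alt args project_aliases
instance (args : List String) (project_aliases : List String) (out : Option String × Option String × List String) : Decidable (Spec_parse_project_branch_py args project_aliases out) := by unfold Spec_parse_project_branch_py; infer_instance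

-- ===== CLAIM (what is proved, stated in full; the proofs are below) =====
def Claim_equal_parse_project_branch_py : Prop := ∀ (args : List String) (project_aliases : List String), Dom_parse_project_branch_py args project_aliases → Spec_parse_project_branch_py args project_aliases (parse_project_branch_py args project_aliases)

-- ===== LEMMAS AND PROOFS =====

-- A's loop equals: fold pvBStep over the pvIsContext-takeWhile prefix, consumed = prefix length.
lemma pvAloop_eq (aliases : List String) (toks : List String) (p b : Option String) (c : Nat) :
    pvAloop aliases toks (p, b, c) =
      (((toks.takeWhile (pvIsContext aliases)).foldl pvBStep (p, b)).1,
       ((toks.takeWhile (pvIsContext aliases)).foldl pvBStep (p, b)).2,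
       c + (toks.takeWhile (pvIsContext aliases)).length) := by
  induction toks generalizing p b c with
  | nil => simp [pvAloop]
  | cons t rest ih =>
    by_cases h1 : PySem.Chars.startswith t.toList ['@'] = true ∧ 1 < t.length
    · have hb1 : (PySem.Str.startswith t "@" && decide (1 < PySem.Str.len t)) = true := by
        simp; exact h1
      have hctx : pvIsContext aliases t = true := by
        simp [pvIsContext]; exact Or.inl h1
      simp only [pvAloop, hb1, if_true, List.takeWhile_cons, hctx, List.foldl_cons,
        List.length_cons]
      rw [ih]
      simp [pvBStep, h1, Prod.ext_iff]
      omega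
    · have hb1 : (PySem.Str.startswith t "@" && decide (1 < PySem.Str.len t)) = false := by
        simp; intro hs; by_contra hl; exact h1 ⟨hs, by omega⟩
      by_cases h2 : PySem.Str.lower t ∈ aliases ∧ PySem.Str.lower t ∉ pvRalphCommands
      · have hb2 : (aliases.contains (PySem.Str.lower t) && !pvRalphCommands.contains (PySem.Str.lower t)) = true := by
          simp; exact h2
        have hctx : pvIsContext aliases t = true := by
          simp [pvIsContext]; exact Or.inr h2
        simp only [pvAloop, hb1, Bool.false_eq_true, if_false, hb2, if_true,
          List.takeWhile_cons, hctx, List.foldl_cons, List.length_cons]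
        rw [ih]
        simp [pvBStep, h1, Prod.ext_iff]
        omega
      · have hb2 : (aliases.contains (PySem.Str.lower t) && !pvRalphCommands.contains (PySem.Str.lower t)) = false := by
          simp; intro ha; by_contra hc; exact h2 ⟨ha, hc⟩
        have hctx : pvIsContext aliases t = false := by
          simp [pvIsContext]
          exact ⟨fun hs => by by_contra hl; exact h1 ⟨hs, by omega⟩,
                 fun ha => by by_contra hc; exact h2 ⟨ha, hc⟩⟩
        simp only [pvAloop, hb1, Bool.false_eq_true, if_false, hb2,
          List.takeWhile_cons, hctx]
        simp

-- ===== VERDICT (by name: the statement is the Claim_ definition above) =====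
theorem parse_project_branch_py_spec : Claim_equal_parse_project_branch_py := by
  intro args aliases _
  unfold Spec_parse_project_branch_py parse_project_branch_py parse_project_branch_py_alt
  simp only
  rw [pvAloop_eq]
  simp [PySem.List.slice_from_natCast]
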